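-- pv_equiv track=rewrite | github.com/GioGioStarImpact/pinSwappingEQA | fb_logic_eq_class.py | compute_output_bitvectors
-- ===== SOURCE A (Python) =====
-- from typing import List, Tuple, Dict, Set
--
-- def apply_input_permutation(net_pattern: int, perm: Tuple[int, ...], n: int) -> int:
--     """
--     將輸入 net pattern 根據排列 π 重新排列。
--     Rearrange input net pattern according to permutation π.
--
--     參數 Parameters:
--     - net_pattern: 輸入的 bit pattern (0 到 2^n - 1)
--                    input bit pattern (0 to 2^n - 1)
--     - perm: 排列 π，perm[i] 表示第 i 個 pin 接到第 perm[i] 個 net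
--             permutation π, perm[i] means pin i connects to net perm[i]
--     - n: 輸入數量 number of inputs
--
--     回傳 Returns:
--     - 重新排列後的 bit pattern rearranged bit pattern
--     """
--     result = 0
--     for pin_idx in range(n):
--         net_idx = perm[pin_idx]
--         bit_value = (net_pattern >> net_idx) & 1
--         result |= (bit_value << pin_idx)
--     return result
--
-- def compute_output_bitvectors(
--     truth_table: List[int],
--     n: int,
--     m: int,
--     input_perm: Tuple[int, ...]
-- ) -> List[int]:
--     """
--     計算在給定輸入排列下，每個輸出函數的 bitvector。
--     Compute bitvector for each output function under given input permutation.
--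
--     參數 Parameters:
--     - truth_table: 真值表 truth table
--     - n: 輸入數量 number of inputs
--     - m: 輸出數量 number of outputs
--     - input_perm: 輸入排列 input permutation
--
--     回傳 Returns:
--     - bitvectors: 長度為 m 的列表，每個元素是一個 2^n-bit 的整數
--                   list of length m, each element is a 2^n-bit integer
--     """
--     bitvectors = [0] * m
--
--     for net_pattern in range(1 << n):  # 遍歷所有可能的輸入組合
--         pin_pattern = apply_input_permutation(net_pattern, input_perm, n)
--         output = truth_table[pin_pattern]
--
--         for output_idx in range(m):
--             bit = (output >> output_idx) & 1
--             if bit: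
--                 bitvectors[output_idx] |= (1 << net_pattern)
--
--     return bitvectors
-- ===== SOURCE B (Python) =====
-- def compute_output_bitvectors(truth_table, n, m, input_perm):
--     size = 1 << n
--     # pass 1: materialize the gathered truth table under the input permutation
--     vals = []
--     for p in range(size):
--         idx = 0
--         for dst, src in enumerate(input_perm[:n]):
--             idx |= ((p >> src) & 1) << dst
--         vals.append(truth_table[idx])
--     # pass 2: one column scan per output
--     bitvectors = []
--     for j in range(m):
--         v = 0
--         for p in range(size):
--             if (vals[p] >> j) & 1:
--                 v |= 1 << p
--         bitvectors.append(v)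
--     return bitvectors
-- ===== Notes on version B (the rewrite author's own statement) =====
-- stated objective: alternative
-- what changed: B materializes the permuted truth table as an intermediate vals array in one pass and then builds each output bitvector by a separate per-output column scan over vals, instead of A's single pass that distributes every pattern's output bits into all m accumulators at once.
import Mathlib
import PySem

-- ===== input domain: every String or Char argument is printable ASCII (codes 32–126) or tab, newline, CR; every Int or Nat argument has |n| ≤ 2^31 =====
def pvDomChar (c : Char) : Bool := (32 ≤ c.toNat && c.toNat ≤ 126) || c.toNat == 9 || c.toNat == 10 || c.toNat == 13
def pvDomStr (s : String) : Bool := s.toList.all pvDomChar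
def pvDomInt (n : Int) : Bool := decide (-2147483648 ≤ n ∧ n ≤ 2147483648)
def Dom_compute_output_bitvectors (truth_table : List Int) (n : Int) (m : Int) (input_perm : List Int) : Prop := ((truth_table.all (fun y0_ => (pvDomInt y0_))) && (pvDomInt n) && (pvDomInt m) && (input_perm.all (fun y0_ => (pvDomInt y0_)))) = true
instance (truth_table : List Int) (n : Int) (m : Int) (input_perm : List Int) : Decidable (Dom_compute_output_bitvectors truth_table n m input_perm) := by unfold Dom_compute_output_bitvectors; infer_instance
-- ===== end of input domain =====

-- B materializes the gathered truth table as an intermediate array and then does one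
-- column scan per output, instead of A's single pass distributing each pattern's output
-- bits into all m accumulators (alternative decomposition, same asymptotic cost).

-- ===== PORT A =====
def apply_input_permutation (net_pattern : Int) (perm : List Int) (n : Int) : Int :=
  (PySem.List.pyRange 0 n 1).foldl
    (fun result pin_idx =>
      PySem.Int.bor result
        ((PySem.Int.band (net_pattern >>> (PySem.List.pyGetD perm pin_idx 0).toNat) 1) <<< pin_idx.toNat))
    0

def compute_output_bitvectors (truth_table : List Int) (n : Int) (m : Int) (input_perm : List Int) : List Int :=
  (PySem.List.pyRange 0 ((1:Int) <<< n.toNat) 1).foldl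
    (fun bitvectors net_pattern =>
      let output := PySem.List.pyGetD truth_table (apply_input_permutation net_pattern input_perm n) 0
      (PySem.List.pyRange 0 m 1).foldl
        (fun bv output_idx =>
          if PySem.Int.band (output >>> output_idx.toNat) 1 ≠ 0 then
            bv.set output_idx.toNat
              (PySem.Int.bor (PySem.List.pyGetD bv output_idx 0) ((1:Int) <<< net_pattern.toNat))
          else bv)
        bitvectors)
    (List.replicate m.toNat 0)

-- ===== PORT B =====
-- helper of Source B's pass 1: idx accumulated over enumerate(input_perm[:n])
def pvGatherB (p : Int) (perm : List Int) (n : Int) : Int :=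
  (PySem.List.enumerate (PySem.List.slice perm none (some n))).foldl
    (fun idx ds => PySem.Int.bor idx ((PySem.Int.band (p >>> ds.2.toNat) 1) <<< ds.1.toNat))
    0

def compute_output_bitvectors_alt (truth_table : List Int) (n : Int) (m : Int) (input_perm : List Int) : List Int :=
  let size := (1:Int) <<< n.toNat
  let vals := (PySem.List.pyRange 0 size 1).map
    (fun p => PySem.List.pyGetD truth_table (pvGatherB p input_perm n) 0)
  (PySem.List.pyRange 0 m 1).map (fun j =>
    (PySem.List.pyRange 0 size 1).foldl
      (fun v p =>
        if PySem.Int.band (PySem.List.pyGetD vals p 0 >>> j.toNat) 1 ≠ 0 then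
          PySem.Int.bor v ((1:Int) <<< p.toNat)
        else v)
      0)

-- ===== PRECONDITION & SPEC =====
-- Pre_ is exactly the set of inputs where Python A returns normally: A raises ValueError
-- if n < 0 (1 << n) or some perm entry used is negative (net_pattern >> net_idx), and
-- IndexError if n > len(input_perm) or the largest reachable gathered index
-- (sum of 2^i over i < n with input_perm[i] < n) is not below len(truth_table).
def Pre_compute_output_bitvectors (truth_table : List Int) (n : Int) (m : Int) (input_perm : List Int) : Prop :=
  0 ≤ n ∧ n ≤ (input_perm.length : Int) ∧
  (∀ x ∈ input_perm.take n.toNat, 0 ≤ x) ∧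
  (∑ i ∈ Finset.range n.toNat, if input_perm.getD i 0 < n then (2:Int)^i else 0) < (truth_table.length : Int)
instance (truth_table : List Int) (n : Int) (m : Int) (input_perm : List Int) : Decidable (Pre_compute_output_bitvectors truth_table n m input_perm) := by unfold Pre_compute_output_bitvectors; infer_instance

def pvWitness_compute_output_bitvectors : List Int × Int × Int × List Int := ([1, 2, 0, 3], 2, 2, [1, 0])

def Spec_compute_output_bitvectors (truth_table : List Int) (n : Int) (m : Int) (input_perm : List Int) (out : List Int) : Prop := out = compute_output_bitvectors_alt truth_table n m input_perm
instance (truth_table : List Int) (n : Int) (m : Int) (input_perm : List Int) (out : List Int) : Decidable (Spec_compute_output_bitvectors truth_table n m input_perm out) := by unfold Spec_compute_output_bitvectors; infer_instance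

-- ===== CLAIM (what is proved, stated in full; the proofs are below) =====
def Claim_equal_compute_output_bitvectors : Prop := ∀ (truth_table : List Int) (n : Int) (m : Int) (input_perm : List Int), Dom_compute_output_bitvectors truth_table n m input_perm → Pre_compute_output_bitvectors truth_table n m input_perm → Spec_compute_output_bitvectors truth_table n m input_perm (compute_output_bitvectors truth_table n m input_perm)

-- ===== LEMMAS AND PROOFS =====

-- canonical form of the bit-gather loop: fold over the listed perm entries with position k
def pvGSpec (p : Int) : List Int → Nat → Int → Int
  | [], _, acc => acc
  | x :: xs, k, acc =>
      pvGSpec p xs (k + 1)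
        (PySem.Int.bor acc ((PySem.Int.band (p >>> (x.toNat : Int)) 1) <<< ((k : Nat) : Int)))

theorem pvGatherB_eq_gspec_aux (p : Int) (l : List Int) : ∀ (s : Nat) (acc : Int),
    (PySem.List.enumerate l (s : Int)).foldl
      (fun idx ds => PySem.Int.bor idx ((PySem.Int.band (p >>> ds.2.toNat) 1) <<< ds.1.toNat)) acc
    = pvGSpec p l s acc := by
  induction l with
  | nil => intro s acc; simp [PySem.List.enumerate, pvGSpec]
  | cons x xs ih =>
      intro s acc
      rw [PySem.List.enumerate_cons]
      have h1 : ((s : Int) + 1) = ((s + 1 : Nat) : Int) := by push_cast; ring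
      simp only [List.foldl_cons, h1, ih]
      simp only [pvGSpec, Int.toNat_natCast, Int.shiftLeft_natCast_right,
        Int.shiftRight_natCast_right]

theorem pvGatherB_eq_gspec (p : Int) (perm : List Int) (n : Int) (hn : 0 ≤ n) :
    pvGatherB p perm n = pvGSpec p (perm.take n.toNat) 0 0 := by
  unfold pvGatherB
  rw [PySem.List.slice_to perm hn]
  exact pvGatherB_eq_gspec_aux p (perm.take n.toNat) 0 0

theorem pvApply_eq_gspec_aux (p : Int) (perm : List Int) (n : Int) (hn : 0 ≤ n)
    (hlen : n.toNat ≤ perm.length) :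
    ∀ (k a : Nat), a + k = n.toNat → ∀ acc : Int,
      (PySem.List.pyRange (a : Int) n 1).foldl
        (fun result pin_idx =>
          PySem.Int.bor result
            ((PySem.Int.band (p >>> (PySem.List.pyGetD perm pin_idx 0).toNat) 1) <<< pin_idx.toNat))
        acc
      = pvGSpec p ((perm.drop a).take k) a acc := by
  intro k
  induction k with
  | zero =>
      intro a ha acc
      have : n ≤ (a : Int) := by omega
      rw [PySem.List.pyRange_one_eq_nil this]
      simp [pvGSpec]
  | succ k ih =>
      intro a ha acc
      have han : (a : Int) < n := by omega
      have halen : a < perm.length := by omega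
      rw [PySem.List.pyRange_one_cons han]
      rw [List.foldl_cons]
      have hget : PySem.List.pyGetD perm (a : Int) 0 = perm[a] := by
        rw [PySem.List.pyGetD_natCast, List.getD_eq_getElem perm 0 halen]
      have hdrop : (perm.drop a).take (k + 1) = perm[a] :: (perm.drop (a + 1)).take k := by
        rw [List.drop_eq_getElem_cons halen, List.take_succ_cons]
      have hcast : ((a : Int) + 1) = ((a + 1 : Nat) : Int) := by push_cast; ring
      rw [hget, hdrop, hcast, ih (a + 1) (by omega)]
      simp only [pvGSpec, Int.toNat_natCast, Int.shiftLeft_natCast_right,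
        Int.shiftRight_natCast_right]

theorem pvApply_eq_gatherB (p : Int) (perm : List Int) (n : Int) (hn : 0 ≤ n)
    (hlen : n ≤ (perm.length : Int)) :
    apply_input_permutation p perm n = pvGatherB p perm n := by
  unfold apply_input_permutation
  rw [pvGatherB_eq_gspec p perm n hn]
  have h := pvApply_eq_gspec_aux p perm n hn (by omega) n.toNat 0 (by omega) 0
  simpa using h

-- loop interchange, inner step: distributing one pattern's bits into all m cells equals
-- a pointwise update of the materialized column values
theorem pvInner_interchange (m : Int) (c : Int → Prop) [DecidablePred c] (e : Int) :
    ∀ (k a : Nat) (pre : List Int) (g : Int → Int), pre.length = a → (a : Int) + k = m →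
      (PySem.List.pyRange (a : Int) m 1).foldl
        (fun bv j =>
          if c j then bv.set j.toNat (PySem.Int.bor (PySem.List.pyGetD bv j 0) e) else bv)
        (pre ++ (PySem.List.pyRange (a : Int) m 1).map g)
      = pre ++ (PySem.List.pyRange (a : Int) m 1).map
          (fun j => if c j then PySem.Int.bor (g j) e else g j) := by
  intro k
  induction k with
  | zero =>
      intro a pre g hpre ham
      have : m ≤ (a : Int) := by omega
      rw [PySem.List.pyRange_one_eq_nil this]
      simp
  | succ k ih =>
      intro a pre g hpre ham
      have ham : (a : Int) < m := by omega
      rw [PySem.List.pyRange_one_cons ham]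
      simp only [List.map_cons, List.foldl_cons]
      have hcast : ((a : Int) + 1) = ((a + 1 : Nat) : Int) := by push_cast; ring
      have hget : PySem.List.pyGetD
          (pre ++ g (a : Int) :: (PySem.List.pyRange ((a : Int) + 1) m 1).map g) (a : Int) 0
          = g (a : Int) := by
        rw [PySem.List.pyGetD_natCast, List.getD_append_right _ _ _ _ (by omega)]
        simp [hpre]
      by_cases hc : c (a : Int)
      · simp only [if_pos hc, hget, Int.toNat_natCast]
        have hset : (pre ++ g (a : Int) :: (PySem.List.pyRange ((a : Int) + 1) m 1).map g).set a
            (PySem.Int.bor (g (a : Int)) e)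
            = (pre ++ [PySem.Int.bor (g (a : Int)) e])
              ++ (PySem.List.pyRange ((a : Int) + 1) m 1).map g := by
          rw [List.set_append_right _ _ (by omega)]
          simp [hpre]
        rw [hset, hcast, ih (a + 1) (pre ++ [PySem.Int.bor (g (a : Int)) e]) g (by simp [hpre]) (by omega)]
        simp
      · simp only [if_neg hc]
        have hback : pre ++ g (a : Int) :: (PySem.List.pyRange ((a : Int) + 1) m 1).map g
            = (pre ++ [g (a : Int)]) ++ (PySem.List.pyRange ((a : Int) + 1) m 1).map g := by
          simp
        rw [hback, hcast, ih (a + 1) (pre ++ [g (a : Int)]) g (by simp [hpre]) (by omega)]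
        simp

theorem pvInner_interchange_zero (m : Int) (c : Int → Prop) [DecidablePred c] (e : Int)
    (g : Int → Int) :
    (PySem.List.pyRange 0 m 1).foldl
      (fun bv j =>
        if c j then bv.set j.toNat (PySem.Int.bor (PySem.List.pyGetD bv j 0) e) else bv)
      ((PySem.List.pyRange 0 m 1).map g)
    = (PySem.List.pyRange 0 m 1).map (fun j => if c j then PySem.Int.bor (g j) e else g j) := by
  by_cases hm : m ≤ 0
  · rw [PySem.List.pyRange_one_eq_nil hm]; simp
  · have := pvInner_interchange m c e m.toNat 0 [] g rfl (by omega)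
    simpa using this

-- loop interchange, outer: A's pattern-major double loop equals B's output-major map
theorem pvOuter_interchange (m : Int) (c : Int → Int → Prop) [∀ j p, Decidable (c j p)]
    (e : Int → Int) :
    ∀ (ps : List Int) (g : Int → Int),
      ps.foldl
        (fun bv p =>
          (PySem.List.pyRange 0 m 1).foldl
            (fun bv j =>
              if c j p then bv.set j.toNat (PySem.Int.bor (PySem.List.pyGetD bv j 0) (e p))
              else bv)
            bv)
        ((PySem.List.pyRange 0 m 1).map g)
      = (PySem.List.pyRange 0 m 1).map
          (fun j => ps.foldl (fun v p => if c j p then PySem.Int.bor v (e p) else v) (g j)) := by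
  intro ps
  induction ps with
  | nil => intro g; simp
  | cons p ps ih =>
      intro g
      simp only [List.foldl_cons]
      rw [pvInner_interchange_zero m (fun j => c j p) (e p) g, ih]

-- ===== VERDICT (by name: the statement is the Claim_ definition above) =====
theorem compute_output_bitvectors_spec : Claim_equal_compute_output_bitvectors := by
  intro truth_table n m input_perm _hdom hpre
  obtain ⟨hn, hlen, _hnn, _htt⟩ := hpre
  unfold Spec_compute_output_bitvectors compute_output_bitvectors compute_output_bitvectors_alt
  dsimp only
  have hrep : (List.replicate m.toNat (0 : Int))
      = (PySem.List.pyRange 0 m 1).map (fun _ => (0 : Int)) := by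
    rw [List.map_const']
    simp [PySem.List.length_pyRange_one]
  rw [hrep]
  rw [pvOuter_interchange m
      (fun j p =>
        PySem.Int.band
          (PySem.List.pyGetD truth_table (apply_input_permutation p input_perm n) 0
            >>> ((j.toNat : Nat) : Int)) 1
          ≠ 0)
      (fun p => (1 : Int) <<< p.toNat)
      (PySem.List.pyRange 0 ((1:Int) <<< n.toNat) 1) (fun _ => (0 : Int))]
  apply List.map_congr_left
  intro j _hj
  apply PySem.List.foldl_congr_mem
  intro acc p hp
  rw [PySem.List.mem_pyRange_one] at hp
  rw [PySem.List.pyGetD_map_pyRange_of_nonneg _ _ _ _ hp.1 hp.2,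
    pvApply_eq_gatherB p input_perm n hn hlen]
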